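-- pv_equiv track=rewrite | github.com/bayhiker/python-algorithms | leetcode/lc_1700/lc_1765.py | highest_peak_heap
-- ===== SOURCE A (Python) =====
-- def highest_peak_heap(is_water: list[list[int]]) -> list[list[int]]:
--     # This problem is look for max of min distance to water (for any land cell)
--     # Similar to ideas used in trapping rain water II (407).
--     # We let the sea level rise from 0
--     m, n = len(is_water), len(is_water[0])
--     result: list[list[bool]] = [[-1 for j in range(n)] for i in range(m)]
--     from queue import PriorityQueue
--
--     pq = PriorityQueue()
--     for i in range(m):
--         for j in range(n):
--             if is_water[i][j] == 1:
--                 pq.put((0, i, j))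
--                 result[i][j] = 0
--
--     def get_unvisited_neighbors(i, j) -> list[list[int]]:
--         neighbors = []
--         for offset_i, offset_j in [[0, 1], [0, -1], [1, 0], [-1, 0]]:
--             new_i, new_j = i + offset_i, j + offset_j
--             if new_i < 0 or new_i >= m or new_j < 0 or new_j >= n:
--                 continue
--             if result[new_i][new_j] >= 0:  # visited
--                 continue
--             neighbors.append([new_i, new_j])
--         return neighbors
--
--     max_peak = 0
--     while not pq.empty():
--         (max_peak, i, j) = pq.get()
--         neighbors = get_unvisited_neighbors(i, j)
--         for neighbor in neighbors:
--             pq.put((max_peak + 1, neighbor[0], neighbor[1]))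
--             result[neighbor[0]][neighbor[1]] = max_peak + 1
--     return result
-- ===== SOURCE B (Python) =====
-- def highest_peak_heap(is_water: list[list[int]]) -> list[list[int]]:
--     # Closed form: with no obstacles, the BFS distance from the nearest water
--     # cell is just the minimum Manhattan distance over all water cells.
--     m, n = len(is_water), len(is_water[0])
--     waters = [(i, j) for i in range(m) for j in range(n) if is_water[i][j] == 1]
--     if not waters:
--         return [[-1] * n for _ in range(m)]
--     return [[min(abs(i - wi) + abs(j - wj) for wi, wj in waters)
--              for j in range(n)] for i in range(m)]
-- ===== Notes on version B (the rewrite author's own statement) =====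
-- stated objective: simpler
-- what changed: Replaced the rising-sea-level priority-queue BFS with a closed form: since the grid has no obstacles, each cell's BFS distance to water is simply the minimum Manhattan distance over all water cells, computed directly per cell.
import Mathlib
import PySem

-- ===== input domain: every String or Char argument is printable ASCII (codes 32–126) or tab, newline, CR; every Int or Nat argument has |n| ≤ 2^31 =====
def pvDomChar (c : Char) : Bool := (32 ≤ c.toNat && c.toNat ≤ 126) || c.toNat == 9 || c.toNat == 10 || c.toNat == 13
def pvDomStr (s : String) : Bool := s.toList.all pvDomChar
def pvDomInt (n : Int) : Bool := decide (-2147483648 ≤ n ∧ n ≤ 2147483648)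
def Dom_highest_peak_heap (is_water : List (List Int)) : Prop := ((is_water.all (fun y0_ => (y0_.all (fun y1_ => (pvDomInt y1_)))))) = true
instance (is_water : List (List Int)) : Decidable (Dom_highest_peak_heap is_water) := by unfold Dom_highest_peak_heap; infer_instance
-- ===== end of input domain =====

-- B replaces the rising-sea-level priority-queue BFS by the per-cell closed form
-- (minimum Manhattan distance to any water cell), valid because the grid has no obstacles.

-- ===== PORT A =====

-- model of queue.PriorityQueue over distinct Int triples: a list kept sorted by
-- lexicographic order; put = ordered insert, get = head.
def pqLt (a b : Int × Int × Int) : Bool :=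
  a.1 < b.1 || (a.1 == b.1 && (a.2.1 < b.2.1 || (a.2.1 == b.2.1 && a.2.2 < b.2.2)))

def pqInsert (e : Int × Int × Int) : List (Int × Int × Int) → List (Int × Int × Int)
  | [] => [e]
  | x :: xs => if pqLt e x then e :: x :: xs else x :: pqInsert e xs

-- result[i][j] read/write; used only at indices already guarded 0 ≤ i < m, 0 ≤ j < n,
-- where Int.toNat is exact (Python never sees a negative index here).
def getCell (g : List (List Int)) (i j : Int) : Int := (g.getD i.toNat []).getD j.toNat 0
def setCell (g : List (List Int)) (i j : Int) (v : Int) : List (List Int) :=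
  g.set i.toNat ((g.getD i.toNat []).set j.toNat v)

-- get_unvisited_neighbors, same offset order [0,1],[0,-1],[1,0],[-1,0]
def unvisitedNeighbors (m n : Nat) (R : List (List Int)) (i j : Int) : List (Int × Int) :=
  [((0:Int),(1:Int)), (0,-1), (1,0), (-1,0)].foldl (fun acc o =>
    let ni := i + o.1
    let nj := j + o.2
    if ni < 0 ∨ (m:Int) ≤ ni ∨ nj < 0 ∨ (n:Int) ≤ nj then acc
    else if 0 ≤ getCell R ni nj then acc
    else acc ++ [(ni, nj)]) []

-- the while-loop; fuel only totalizes it (3*m*n+1 is proved sufficient below)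
def loopA (m n : Nat) : Nat → List (Int × Int × Int) → List (List Int) → List (List Int)
  | 0, _, R => R
  | _+1, [], R => R
  | fuel+1, (d, i, j) :: rest, R =>
    let nbrs := unvisitedNeighbors m n R i j
    let s := nbrs.foldl (fun s c => (pqInsert (d+1, c.1, c.2) s.1, setCell s.2 c.1 c.2 (d+1))) (rest, R)
    loopA m n fuel s.1 s.2

def highest_peak_heap (is_water : List (List Int)) : List (List Int) :=
  let m := is_water.length
  let n := (is_water.headD []).length
  let result0 : List (List Int) := (List.range m).map (fun _ => (List.range n).map (fun _ => (-1 : Int)))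
  let init := (List.range m).foldl (fun s i =>
    (List.range n).foldl (fun s j =>
      if (is_water.getD i []).getD j 0 = 1 then
        (pqInsert (0, (i : Int), (j : Int)) s.1, setCell s.2 (i : Int) (j : Int) 0)
      else s) s) (([] : List (Int × Int × Int)), result0)
  loopA m n (3 * m * n + 1) init.1 init.2

-- ===== PORT B =====

-- abs(i - wi) + abs(j - wj)
def mdist (i j : Nat) (w : Nat × Nat) : Int := (((i : Int) - (w.1 : Int)).natAbs : Int) + (((j : Int) - (w.2 : Int)).natAbs : Int)

-- the waters list comprehension (row-major)
def watersOf (is_water : List (List Int)) : List (Nat × Nat) :=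
  (List.range is_water.length).flatMap (fun i =>
    (List.range (is_water.headD []).length).filterMap (fun j =>
      if (is_water.getD i []).getD j 0 = 1 then some (i, j) else none))

def highest_peak_heap_alt (is_water : List (List Int)) : List (List Int) :=
  let m := is_water.length
  let n := (is_water.headD []).length
  match watersOf is_water with
  | [] => (List.range m).map (fun _ => (List.range n).map (fun _ => (-1 : Int)))
  | w :: ws => (List.range m).map (fun i => (List.range n).map (fun j =>
      (ws.map (mdist i j)).foldl min (mdist i j w)))

-- ===== PRECONDITION & SPEC =====
-- Pre_ excludes exactly the inputs where Python A raises IndexError: the empty list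
-- (is_water[0]) and grids with a row shorter than the first row (is_water[i][j]).
def Pre_highest_peak_heap (is_water : List (List Int)) : Prop :=
  is_water ≠ [] ∧ ∀ row ∈ is_water, (is_water.headD []).length ≤ row.length
instance (is_water : List (List Int)) : Decidable (Pre_highest_peak_heap is_water) := by
  unfold Pre_highest_peak_heap; infer_instance

def pvWitness_highest_peak_heap : List (List Int) := [[1, 0], [0, 0]]

def Spec_highest_peak_heap (is_water : List (List Int)) (out : List (List Int)) : Prop := out = highest_peak_heap_alt is_water
instance (is_water : List (List Int)) (out : List (List Int)) : Decidable (Spec_highest_peak_heap is_water out) := by unfold Spec_highest_peak_heap; infer_instance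

-- ===== CLAIM (what is proved, stated in full; the proofs are below) =====
def Claim_equal_highest_peak_heap : Prop := ∀ (is_water : List (List Int)), Dom_highest_peak_heap is_water → Pre_highest_peak_heap is_water → Spec_highest_peak_heap is_water (highest_peak_heap is_water)

-- ===== LEMMAS AND PROOFS =====

-- ---------- generic fold lemmas ----------
theorem foldl_pair_split {α β γ : Type} (L : List α) (f : β → α → β) (g : γ → α → γ) (b : β) (c : γ) :
    L.foldl (fun s x => (f s.1 x, g s.2 x)) (b, c) = (L.foldl f b, L.foldl g c) := by
  induction L generalizing b c with
  | nil => rfl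
  | cons x xs ih => simp [List.foldl, ih]

theorem foldl_flatMap' {α β γ : Type} (l : List α) (f : α → List β) (g : γ → β → γ) (init : γ) :
    (l.flatMap f).foldl g init = l.foldl (fun s a => (f a).foldl g s) init := by
  induction l generalizing init with
  | nil => rfl
  | cons x xs ih => simp [List.flatMap_cons, List.foldl_append, ih]

theorem foldl_filterMap_if {α β γ : Type} (l : List α) (p : α → Prop) [DecidablePred p]
    (h : α → β) (g : γ → β → γ) (init : γ) :
    (l.filterMap (fun a => if p a then some (h a) else none)).foldl g init
      = l.foldl (fun s a => if p a then g s (h a) else s) init := by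
  induction l generalizing init with
  | nil => rfl
  | cons x xs ih =>
    by_cases hp : p x <;> simp [hp, ih]

-- ---------- Int min-fold lemmas ----------
theorem foldl_min_le_init (a : Int) (l : List Int) : l.foldl min a ≤ a := by
  induction l generalizing a with
  | nil => simp
  | cons x xs ih => exact le_trans (ih _) (min_le_left _ _)

theorem foldl_min_le_mem {x : Int} {l : List Int} (h : x ∈ l) (a : Int) : l.foldl min a ≤ x := by
  induction l generalizing a with
  | nil => cases h
  | cons y ys ih =>
    rcases List.mem_cons.1 h with rfl | h'
    · simp only [List.foldl]
      exact le_trans (foldl_min_le_init _ _) (min_le_right _ _)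
    · exact ih h' _

theorem foldl_min_cases (a : Int) (l : List Int) : l.foldl min a = a ∨ l.foldl min a ∈ l := by
  induction l generalizing a with
  | nil => simp
  | cons x xs ih =>
    rcases ih (min a x) with h | h
    · rcases le_total a x with hax | hax
      · left; simpa [min_eq_left hax] using h
      · right; simp only [List.foldl] at *
        rw [h, min_eq_right hax]; exact List.mem_cons_self ..
    · right; exact List.mem_cons_of_mem _ h

-- ---------- fmin ----------
def fmin (ws : List (Nat × Nat)) (i j : Nat) : Int :=
  match ws with
  | [] => -1
  | w :: t => (t.map (mdist i j)).foldl min (mdist i j w)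

theorem mdist_nonneg (i j : Nat) (w : Nat × Nat) : 0 ≤ mdist i j w := by
  unfold mdist; positivity

theorem fmin_le {ws : List (Nat × Nat)} {w : Nat × Nat} (h : w ∈ ws) (i j : Nat) :
    fmin ws i j ≤ mdist i j w := by
  cases ws with
  | nil => cases h
  | cons x t =>
    rcases List.mem_cons.1 h with rfl | h'
    · exact foldl_min_le_init _ _
    · exact foldl_min_le_mem (List.mem_map_of_mem h') _

theorem fmin_exists {ws : List (Nat × Nat)} (h : ws ≠ []) (i j : Nat) :
    ∃ w ∈ ws, fmin ws i j = mdist i j w := by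
  cases ws with
  | nil => exact absurd rfl h
  | cons x t =>
    rcases foldl_min_cases (mdist i j x) (t.map (mdist i j)) with h1 | h1
    · exact ⟨x, List.mem_cons_self .., h1⟩
    · rcases List.mem_map.1 h1 with ⟨w, hw, hw2⟩
      exact ⟨w, List.mem_cons_of_mem _ hw, hw2.symm⟩

theorem fmin_nonneg {ws : List (Nat × Nat)} (h : ws ≠ []) (i j : Nat) : 0 ≤ fmin ws i j := by
  rcases fmin_exists h i j with ⟨w, _, hw⟩
  rw [hw]; exact mdist_nonneg _ _ _

theorem fmin_water {ws : List (Nat × Nat)} {i j : Nat} (h : (i, j) ∈ ws) : fmin ws i j = 0 := by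
  have h1 := fmin_le h i j
  have h2 : mdist i j (i, j) = 0 := by simp [mdist]
  have h3 := fmin_nonneg (ws := ws) (by intro he; subst he; cases h) i j
  omega

theorem fmin_zero_mem {ws : List (Nat × Nat)} {i j : Nat} (hne : ws ≠ [])
    (h : fmin ws i j = 0) : (i, j) ∈ ws := by
  rcases fmin_exists hne i j with ⟨w, hw, hwe⟩
  have : mdist i j w = 0 := by omega
  have hw1 : w.1 = i ∧ w.2 = j := by
    simp only [mdist] at this; constructor <;> omega
  obtain ⟨w1, w2⟩ := w
  simp only at hw1
  rw [hw1.1, hw1.2] at hw; exact hw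

-- adjacency of Nat cells
def adjN (i j i' j' : Nat) : Prop :=
  (i' = i ∧ (j' = j + 1 ∨ j' + 1 = j)) ∨ (j' = j ∧ (i' = i + 1 ∨ i' + 1 = i))

theorem adjN_symm {i j i' j' : Nat} (h : adjN i j i' j') : adjN i' j' i j := by
  unfold adjN at *; omega

theorem mdist_adj {i j i' j' : Nat} (h : adjN i j i' j') (w : Nat × Nat) :
    mdist i j w ≤ mdist i' j' w + 1 := by
  simp only [mdist]
  unfold adjN at h; omega

theorem fmin_lip {ws : List (Nat × Nat)} (hne : ws ≠ []) {i j i' j' : Nat}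
    (h : adjN i j i' j') : fmin ws i j ≤ fmin ws i' j' + 1 := by
  rcases fmin_exists hne i' j' with ⟨w, hw, hwe⟩
  calc fmin ws i j ≤ mdist i j w := fmin_le hw i j
    _ ≤ mdist i' j' w + 1 := mdist_adj h w
    _ = fmin ws i' j' + 1 := by rw [hwe]

theorem fmin_parent {ws : List (Nat × Nat)} {m n i j : Nat} (hne : ws ≠ [])
    (hgrid : ∀ w ∈ ws, w.1 < m ∧ w.2 < n) (hi : i < m) (hj : j < n)
    (hpos : 0 < fmin ws i j) :
    ∃ i' j', i' < m ∧ j' < n ∧ adjN i j i' j' ∧ fmin ws i' j' = fmin ws i j - 1 := by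
  rcases fmin_exists hne i j with ⟨w, hw, hwe⟩
  obtain ⟨hw1, hw2⟩ := hgrid w hw
  by_cases hci : i = w.1
  · have hcj : j ≠ w.2 := by
      intro hcj
      rw [hwe] at hpos
      simp [mdist, hci, hcj] at hpos
    by_cases hlt : j < w.2
    · refine ⟨i, j + 1, hi, by omega, by unfold adjN; omega, ?_⟩
      have hd : mdist i (j + 1) w = mdist i j w - 1 := by
        simp only [mdist]; omega
      have h1 := fmin_le hw i (j + 1)
      have h2 : fmin ws i j ≤ fmin ws i (j + 1) + 1 :=
        fmin_lip hne (by unfold adjN; omega)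
      omega
    · refine ⟨i, j - 1, hi, by omega, by unfold adjN; omega, ?_⟩
      have hd : mdist i (j - 1) w = mdist i j w - 1 := by
        simp only [mdist]; omega
      have h1 := fmin_le hw i (j - 1)
      have h2 : fmin ws i j ≤ fmin ws i (j - 1) + 1 :=
        fmin_lip hne (by unfold adjN; omega)
      omega
  · by_cases hlt : i < w.1
    · refine ⟨i + 1, j, by omega, hj, by unfold adjN; omega, ?_⟩
      have hd : mdist (i + 1) j w = mdist i j w - 1 := by
        simp only [mdist]; omega
      have h1 := fmin_le hw (i + 1) j
      have h2 : fmin ws i j ≤ fmin ws (i + 1) j + 1 :=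
        fmin_lip hne (by unfold adjN; omega)
      omega
    · refine ⟨i - 1, j, by omega, hj, by unfold adjN; omega, ?_⟩
      have hd : mdist (i - 1) j w = mdist i j w - 1 := by
        simp only [mdist]; omega
      have h1 := fmin_le hw (i - 1) j
      have h2 : fmin ws i j ≤ fmin ws (i - 1) j + 1 :=
        fmin_lip hne (by unfold adjN; omega)
      omega

-- ---------- priority-queue lemmas ----------
theorem pqLt_asymm {a b : Int × Int × Int} (h : pqLt a b = true) : pqLt b a = false := by
  obtain ⟨a1, a2, a3⟩ := a; obtain ⟨b1, b2, b3⟩ := b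
  simp only [pqLt, Bool.or_eq_true, Bool.and_eq_true, decide_eq_true_eq, beq_iff_eq,
    Bool.or_eq_false_iff, Bool.and_eq_false_iff, decide_eq_false_iff_not, beq_eq_false_iff_ne] at *
  omega

theorem pqLt_le_trans {a b c : Int × Int × Int} (h1 : pqLt a b = true) (h2 : pqLt c b = false) :
    pqLt c a = false := by
  obtain ⟨a1, a2, a3⟩ := a; obtain ⟨b1, b2, b3⟩ := b; obtain ⟨c1, c2, c3⟩ := c
  simp only [pqLt, Bool.or_eq_true, Bool.and_eq_true, decide_eq_true_eq, beq_iff_eq,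
    Bool.or_eq_false_iff, Bool.and_eq_false_iff, decide_eq_false_iff_not, beq_eq_false_iff_ne] at *
  omega

theorem pqLt_fst {a b : Int × Int × Int} (h : pqLt a b = false) : b.1 ≤ a.1 := by
  obtain ⟨a1, a2, a3⟩ := a; obtain ⟨b1, b2, b3⟩ := b
  simp only [pqLt, Bool.or_eq_false_iff, Bool.and_eq_false_iff, decide_eq_false_iff_not,
    beq_eq_false_iff_ne] at h
  by_cases he : a1 = b1
  · omega
  · rcases h with ⟨h1, _⟩; omega

theorem mem_pqInsert {e x : Int × Int × Int} {l : List (Int × Int × Int)} :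
    x ∈ pqInsert e l ↔ x = e ∨ x ∈ l := by
  induction l with
  | nil => simp [pqInsert]
  | cons y ys ih =>
    simp only [pqInsert]
    split
    · simp [List.mem_cons]
    · simp [List.mem_cons, ih]; tauto

theorem length_pqInsert (e : Int × Int × Int) (l : List (Int × Int × Int)) :
    (pqInsert e l).length = l.length + 1 := by
  induction l with
  | nil => rfl
  | cons y ys ih => simp only [pqInsert]; split <;> simp [ih]

theorem pairwise_pqInsert {e : Int × Int × Int} {l : List (Int × Int × Int)}
    (h : l.Pairwise (fun x y => pqLt y x = false)) :
    (pqInsert e l).Pairwise (fun x y => pqLt y x = false) := by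
  induction l with
  | nil => simp [pqInsert]
  | cons x xs ih =>
    rcases List.pairwise_cons.1 h with ⟨hx, hxs⟩
    simp only [pqInsert]
    split
    · rename_i hlt
      refine List.pairwise_cons.2 ⟨?_, h⟩
      intro y hy
      rcases List.mem_cons.1 hy with rfl | hy'
      · exact pqLt_asymm hlt
      · exact pqLt_le_trans hlt (hx y hy')
    · rename_i hnlt
      refine List.pairwise_cons.2 ⟨?_, ih hxs⟩
      intro y hy
      rcases mem_pqInsert.1 hy with rfl | hy'
      · simp only [Bool.not_eq_true] at hnlt; exact hnlt
      · exact hx y hy'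

theorem mem_foldl_pqInsert {α : Type} (L : List α) (en : α → Int × Int × Int)
    (pq : List (Int × Int × Int)) (e : Int × Int × Int) :
    e ∈ L.foldl (fun pq x => pqInsert (en x) pq) pq ↔ e ∈ pq ∨ ∃ x ∈ L, e = en x := by
  induction L generalizing pq with
  | nil => simp
  | cons x xs ih =>
    simp only [List.foldl, ih, mem_pqInsert]
    constructor
    · rintro (⟨rfl | h⟩ | ⟨y, hy, rfl⟩)
      · exact Or.inr ⟨x, List.mem_cons_self .., rfl⟩
      · exact Or.inl h
      · exact Or.inr ⟨y, List.mem_cons_of_mem _ hy, rfl⟩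
    · rintro (h | ⟨y, hy, rfl⟩)
      · exact Or.inl (Or.inr h)
      · rcases List.mem_cons.1 hy with rfl | hy'
        · exact Or.inl (Or.inl rfl)
        · exact Or.inr ⟨y, hy', rfl⟩

theorem pairwise_foldl_pqInsert {α : Type} (L : List α) (en : α → Int × Int × Int)
    {pq : List (Int × Int × Int)} (h : pq.Pairwise (fun x y => pqLt y x = false)) :
    (L.foldl (fun pq x => pqInsert (en x) pq) pq).Pairwise (fun x y => pqLt y x = false) := by
  induction L generalizing pq with
  | nil => exact h
  | cons x xs ih => exact ih (pairwise_pqInsert h)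

theorem length_foldl_pqInsert {α : Type} (L : List α) (en : α → Int × Int × Int)
    (pq : List (Int × Int × Int)) :
    (L.foldl (fun pq x => pqInsert (en x) pq) pq).length = pq.length + L.length := by
  induction L generalizing pq with
  | nil => rfl
  | cons x xs ih => simp [List.foldl, ih, length_pqInsert]; omega

-- ---------- grid lemmas ----------
def natGet (R : List (List Int)) (i j : Nat) : Int := (R.getD i []).getD j 0

def Shape (m n : Nat) (R : List (List Int)) : Prop :=
  R.length = m ∧ ∀ row ∈ R, row.length = n

theorem setCell_natCast (R : List (List Int)) (i j : Nat) (v : Int) :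
    setCell R (i : Int) (j : Int) v = R.set i ((R.getD i []).set j v) := by
  simp [setCell]

theorem shape_setCell {m n : Nat} {R : List (List Int)} (h : Shape m n R) {i : Nat}
    (hi : i < m) (j : Nat) (v : Int) :
    Shape m n (setCell R (i : Int) (j : Int) v) := by
  obtain ⟨h1, h2⟩ := h
  have hiR : i < R.length := h1 ▸ hi
  rw [setCell_natCast]
  refine ⟨by simp [h1], ?_⟩
  intro row hrow
  rcases List.mem_or_eq_of_mem_set hrow with hmem | heq
  · exact h2 _ hmem
  · subst heq
    rw [List.length_set, List.getD_eq_getElem _ _ hiR]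
    exact h2 _ (List.getElem_mem _)

theorem natGet_setCell {m n : Nat} {R : List (List Int)} (h : Shape m n R)
    {i j : Nat} (hi : i < m) (hj : j < n) (v : Int) (i' j' : Nat) :
    natGet (setCell R (i : Int) (j : Int) v) i' j'
      = if i' = i ∧ j' = j then v else natGet R i' j' := by
  obtain ⟨h1, h2⟩ := h
  have hiR : i < R.length := h1 ▸ hi
  have hrowlen : (R[i]?.getD []).length = n := by
    rw [List.getElem?_eq_getElem hiR]
    exact h2 _ (List.getElem_mem _)
  rw [setCell_natCast]
  simp only [natGet, List.getD_eq_getElem?_getD]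
  by_cases hii : i' = i
  · subst hii
    rw [List.getElem?_set_self (by omega), Option.getD_some]
    by_cases hjj : j' = j
    · subst hjj
      rw [List.getElem?_set_self (by omega), Option.getD_some]
      simp
    · rw [List.getElem?_set_ne (by omega)]
      simp [hjj]
  · rw [List.getElem?_set_ne (by omega)]
    simp [hii]

-- ---------- setting many cells ----------
def setMany (L : List (Nat × Nat)) (v : Int) (R : List (List Int)) : List (List Int) :=
  L.foldl (fun R c => setCell R (c.1 : Int) (c.2 : Int) v) R

theorem shape_setMany {m n : Nat} {L : List (Nat × Nat)} {v : Int} {R : List (List Int)}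
    (hL : ∀ c ∈ L, c.1 < m ∧ c.2 < n) (h : Shape m n R) : Shape m n (setMany L v R) := by
  induction L generalizing R with
  | nil => exact h
  | cons c L' ih =>
    exact ih (fun c hc => hL c (List.mem_cons_of_mem _ hc))
      (shape_setCell h (hL c (List.mem_cons_self ..)).1 _ _)

theorem natGet_setMany {m n : Nat} {L : List (Nat × Nat)} {v : Int} {R : List (List Int)}
    (hL : ∀ c ∈ L, c.1 < m ∧ c.2 < n) (h : Shape m n R) (i' j' : Nat) :
    natGet (setMany L v R) i' j' = if (i', j') ∈ L then v else natGet R i' j' := by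
  induction L generalizing R with
  | nil => simp [setMany]
  | cons c L' ih =>
    have hc := hL c (List.mem_cons_self ..)
    have hL' := fun c hc => hL c (List.mem_cons_of_mem _ hc)
    have hsh := shape_setCell (i := c.1) h hc.1 c.2 v
    show natGet (setMany L' v _) i' j' = _
    rw [ih hL' hsh, natGet_setCell h hc.1 hc.2 v i' j']
    by_cases h1 : (i', j') ∈ L' <;> by_cases h2 : i' = c.1 ∧ j' = c.2 <;>
      simp [h1, h2, List.mem_cons, Prod.ext_iff] <;> tauto

-- ---------- counting unmarked cells ----------
def umCount (m n : Nat) (R : List (List Int)) : Nat :=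
  (((List.range m) ×ˢ (List.range n)).filter fun c => natGet R c.1 c.2 < 0).length

theorem length_filter_flip {α : Type} (l : List α) (hl : l.Nodup) {c : α} (hc : c ∈ l)
    (p q : α → Bool) (hpc : p c = true) (hqc : q c = false)
    (hother : ∀ x ∈ l, x ≠ c → q x = p x) :
    (l.filter q).length + 1 = (l.filter p).length := by
  induction l with
  | nil => cases hc
  | cons a l' ih =>
    rcases List.nodup_cons.1 hl with ⟨ha, hl'⟩
    rcases List.mem_cons.1 hc with rfl | hc'
    · have hfq : l'.filter q = l'.filter p := by
        apply List.filter_congr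
        intro x hx
        exact hother x (List.mem_cons_of_mem _ hx) (fun he => ha (he ▸ hx))
      simp [hpc, hqc, hfq]
    · have hac : a ≠ c := fun he => ha (he ▸ hc')
      have hqa : q a = p a := hother a (List.mem_cons_self ..) hac
      have := ih hl' hc' (fun x hx hxc => hother x (List.mem_cons_of_mem _ hx) hxc)
      cases hpa : p a <;> simp [hqa, hpa] <;> omega

theorem pair_mem_range_product {m n i j : Nat} :
    (i, j) ∈ (List.range m) ×ˢ (List.range n) ↔ i < m ∧ j < n := by
  simp [List.mem_product]

theorem umCount_setCell {m n : Nat} {R : List (List Int)} (h : Shape m n R)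
    {i j : Nat} (hi : i < m) (hj : j < n) (hum : natGet R i j < 0) {v : Int} (hv : 0 ≤ v) :
    umCount m n (setCell R (i : Int) (j : Int) v) + 1 = umCount m n R := by
  apply length_filter_flip _ (List.Nodup.product (List.nodup_range) (List.nodup_range))
      (c := (i, j)) (pair_mem_range_product.2 ⟨hi, hj⟩)
  · simpa using hum
  · simp [natGet_setCell h hi hj v i j]; omega
  · intro x hx hxc
    simp only [decide_eq_decide]
    rw [natGet_setCell h hi hj v x.1 x.2]
    have : ¬ (x.1 = i ∧ x.2 = j) := by
      intro ⟨e1, e2⟩; exact hxc (Prod.ext_iff.2 ⟨e1, e2⟩)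
    simp [this]

theorem umCount_setMany {m n : Nat} {L : List (Nat × Nat)} {R : List (List Int)}
    (hnd : L.Nodup) (hL : ∀ c ∈ L, c.1 < m ∧ c.2 < n)
    (hum : ∀ c ∈ L, natGet R c.1 c.2 < 0) {v : Int} (hv : 0 ≤ v) (h : Shape m n R) :
    umCount m n (setMany L v R) + L.length = umCount m n R := by
  induction L generalizing R with
  | nil => simp [setMany]
  | cons c L' ih =>
    rcases List.nodup_cons.1 hnd with ⟨hcL, hnd'⟩
    have hc := hL c (List.mem_cons_self ..)
    have hsh := shape_setCell (i := c.1) h hc.1 c.2 v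
    have hum' : ∀ x ∈ L', natGet (setCell R (c.1 : Int) (c.2 : Int) v) x.1 x.2 < 0 := by
      intro x hx
      rw [natGet_setCell h hc.1 hc.2 v x.1 x.2]
      have : ¬ (x.1 = c.1 ∧ x.2 = c.2) := by
        intro ⟨e1, e2⟩
        exact hcL (by rwa [show c = x from (Prod.ext_iff.2 ⟨e1.symm, e2.symm⟩)])
      simp [this]
      exact hum x (List.mem_cons_of_mem _ hx)
    have h1 := ih hnd' (fun x hx => hL x (List.mem_cons_of_mem _ hx)) hum' hsh
    have h2 := umCount_setCell h hc.1 hc.2 (hum c (List.mem_cons_self ..)) hv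
    show umCount m n (setMany L' v _) + _ = _
    simp only [List.length_cons]
    omega

theorem umCount_le (m n : Nat) (R : List (List Int)) : umCount m n R ≤ m * n := by
  calc umCount m n R ≤ ((List.range m) ×ˢ (List.range n)).length := List.length_filter_le _ _
    _ = m * n := by simp [List.length_product]

-- ---------- neighbour characterisation ----------
def nbrsN (m n : Nat) (R : List (List Int)) (i j : Nat) : List (Nat × Nat) :=
  (if j + 1 < n ∧ natGet R i (j + 1) < 0 then [(i, j + 1)] else []) ++
  (if 0 < j ∧ natGet R i (j - 1) < 0 then [(i, j - 1)] else []) ++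
  (if i + 1 < m ∧ natGet R (i + 1) j < 0 then [(i + 1, j)] else []) ++
  (if 0 < i ∧ natGet R (i - 1) j < 0 then [(i - 1, j)] else [])

set_option maxHeartbeats 1600000 in
theorem unvisitedNeighbors_eq (m n : Nat) (R : List (List Int)) (i j : Nat)
    (hi : i < m) (hj : j < n) :
    unvisitedNeighbors m n R (i : Int) (j : Int)
      = (nbrsN m n R i j).map (fun c => ((c.1 : Int), (c.2 : Int))) := by
  have key : ∀ (L : List (Int × Int)) (acc : List (Int × Int)),
      L.foldl (fun acc o =>
        let ni := (i : Int) + o.1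
        let nj := (j : Int) + o.2
        if ni < 0 ∨ (m : Int) ≤ ni ∨ nj < 0 ∨ (n : Int) ≤ nj then acc
        else if 0 ≤ getCell R ni nj then acc
        else acc ++ [(ni, nj)]) acc
      = acc ++ L.flatMap (fun o =>
          if (i : Int) + o.1 < 0 ∨ (m : Int) ≤ (i : Int) + o.1 ∨ (j : Int) + o.2 < 0 ∨ (n : Int) ≤ (j : Int) + o.2 then []
          else if 0 ≤ getCell R ((i : Int) + o.1) ((j : Int) + o.2) then []
          else [((i : Int) + o.1, (j : Int) + o.2)]) := by
    intro L
    induction L with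
    | nil => intro acc; simp
    | cons o L ihL =>
      intro acc
      simp only [List.foldl_cons, List.flatMap_cons, ihL]
      split_ifs <;> simp
  unfold unvisitedNeighbors
  rw [key]
  simp only [List.flatMap_cons, List.flatMap_nil, List.append_nil, List.nil_append]
  have e2 : ((j : Int) + 1).toNat = j + 1 := by omega
  have e3 : ((j : Int) + -1).toNat = j - 1 := by omega
  have e4 : ((i : Int) + 1).toNat = i + 1 := by omega
  have e5 : ((i : Int) + -1).toNat = i - 1 := by omega
  have e1 : ((i : Int) + 0).toNat = i := by omega
  have e6 : ((j : Int) + 0).toNat = j := by omega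
  have h1 : (if (i : Int) + 0 < 0 ∨ (m : Int) ≤ (i : Int) + 0 ∨ (j : Int) + 1 < 0 ∨ (n : Int) ≤ (j : Int) + 1 then ([] : List (Int × Int))
         else if 0 ≤ getCell R ((i : Int) + 0) ((j : Int) + 1) then []
         else [((i : Int) + 0, (j : Int) + 1)])
      = (if j + 1 < n ∧ natGet R i (j + 1) < 0 then [(i, j + 1)] else []).map
          (fun c : Nat × Nat => ((c.1 : Int), (c.2 : Int))) := by
    have g : getCell R ((i : Int) + 0) ((j : Int) + 1) = natGet R i (j + 1) := by
      simp only [getCell, natGet, e1, e2]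
    rw [g]
    by_cases c1 : j + 1 < n <;> by_cases c2 : natGet R i (j + 1) < 0 <;>
      simp [c1, c2] <;> (try split_ifs) <;> (try simp_all) <;> omega
  have h2 : (if (i : Int) + 0 < 0 ∨ (m : Int) ≤ (i : Int) + 0 ∨ (j : Int) + -1 < 0 ∨ (n : Int) ≤ (j : Int) + -1 then ([] : List (Int × Int))
         else if 0 ≤ getCell R ((i : Int) + 0) ((j : Int) + -1) then []
         else [((i : Int) + 0, (j : Int) + -1)])
      = (if 0 < j ∧ natGet R i (j - 1) < 0 then [(i, j - 1)] else []).map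
          (fun c : Nat × Nat => ((c.1 : Int), (c.2 : Int))) := by
    have g : getCell R ((i : Int) + 0) ((j : Int) + -1) = natGet R i (j - 1) := by
      simp only [getCell, natGet, e1, e3]
    rw [g]
    by_cases c1 : 0 < j <;> by_cases c2 : natGet R i (j - 1) < 0 <;>
      simp [c1, c2] <;> (try split_ifs) <;> (try simp_all) <;> omega
  have h3 : (if (i : Int) + 1 < 0 ∨ (m : Int) ≤ (i : Int) + 1 ∨ (j : Int) + 0 < 0 ∨ (n : Int) ≤ (j : Int) + 0 then ([] : List (Int × Int))
         else if 0 ≤ getCell R ((i : Int) + 1) ((j : Int) + 0) then []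
         else [((i : Int) + 1, (j : Int) + 0)])
      = (if i + 1 < m ∧ natGet R (i + 1) j < 0 then [(i + 1, j)] else []).map
          (fun c : Nat × Nat => ((c.1 : Int), (c.2 : Int))) := by
    have g : getCell R ((i : Int) + 1) ((j : Int) + 0) = natGet R (i + 1) j := by
      simp only [getCell, natGet, e4, e6]
    rw [g]
    by_cases c1 : i + 1 < m <;> by_cases c2 : natGet R (i + 1) j < 0 <;>
      simp [c1, c2] <;> (try split_ifs) <;> (try simp_all) <;> omega
  have h4 : (if (i : Int) + -1 < 0 ∨ (m : Int) ≤ (i : Int) + -1 ∨ (j : Int) + 0 < 0 ∨ (n : Int) ≤ (j : Int) + 0 then ([] : List (Int × Int))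
         else if 0 ≤ getCell R ((i : Int) + -1) ((j : Int) + 0) then []
         else [((i : Int) + -1, (j : Int) + 0)])
      = (if 0 < i ∧ natGet R (i - 1) j < 0 then [(i - 1, j)] else []).map
          (fun c : Nat × Nat => ((c.1 : Int), (c.2 : Int))) := by
    have g : getCell R ((i : Int) + -1) ((j : Int) + 0) = natGet R (i - 1) j := by
      simp only [getCell, natGet, e5, e6]
    rw [g]
    by_cases c1 : 0 < i <;> by_cases c2 : natGet R (i - 1) j < 0 <;>
      simp [c1, c2] <;> (try split_ifs) <;> (try simp_all) <;> omega
  rw [h1, h2, h3, h4]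
  unfold nbrsN
  simp [List.map_append, List.append_assoc]

-- ---------- the loop invariant ----------
def BfsInv (m n : Nat) (ws : List (Nat × Nat)) (pq : List (Int × Int × Int)) (R : List (List Int)) : Prop :=
  Shape m n R
  ∧ (∀ i j : Nat, i < m → j < n → 0 ≤ natGet R i j → natGet R i j = fmin ws i j)
  ∧ (∀ w ∈ ws, 0 ≤ natGet R w.1 w.2)
  ∧ pq.Pairwise (fun x y => pqLt y x = false)
  ∧ (∀ e ∈ pq, ∃ i j : Nat, i < m ∧ j < n ∧ e = (fmin ws i j, (i : Int), (j : Int)) ∧ 0 ≤ natGet R i j)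
  ∧ (∀ i j : Nat, i < m → j < n → natGet R i j < 0 →
      ∀ i' j' : Nat, i' < m → j' < n → adjN i j i' j' → 0 ≤ natGet R i' j' →
        (fmin ws i' j', (i' : Int), (j' : Int)) ∈ pq)

theorem head_min {d ei ej : Int} {rest : List (Int × Int × Int)}
    (hsort : ((d, ei, ej) :: rest).Pairwise (fun x y => pqLt y x = false)) :
    ∀ e ∈ (d, ei, ej) :: rest, d ≤ e.1 := by
  intro e he
  rcases List.mem_cons.1 he with rfl | he'
  · exact le_refl _
  · exact pqLt_fst ((List.pairwise_cons.1 hsort).1 e he')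

theorem below_marked {m n : Nat} {ws : List (Nat × Nat)} {pq : List (Int × Int × Int)}
    {R : List (List Int)}
    (hne : ws ≠ []) (hgrid : ∀ w ∈ ws, w.1 < m ∧ w.2 < n)
    (hinv : BfsInv m n ws pq R) (dmin : Int) (hmin : ∀ e ∈ pq, dmin ≤ e.1) :
    ∀ k : Nat, ∀ i j : Nat, i < m → j < n → fmin ws i j < dmin → (fmin ws i j).toNat ≤ k →
      0 ≤ natGet R i j := by
  obtain ⟨hsh, hmk, hwm, hsort, hent, hfr⟩ := hinv
  intro k
  induction k with
  | zero =>
    intro i j hi hj hlt hk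
    have hnn := fmin_nonneg hne i j
    have h0 : fmin ws i j = 0 := by omega
    exact hwm _ (fmin_zero_mem hne h0)
  | succ k ih =>
    intro i j hi hj hlt hk
    by_cases hz : fmin ws i j = 0
    · exact hwm _ (fmin_zero_mem hne hz)
    · have hnn := fmin_nonneg hne i j
      have hpos : 0 < fmin ws i j := by omega
      by_contra hum
      push_neg at hum
      obtain ⟨i', j', hi', hj', hadj, hf'⟩ := fmin_parent hne hgrid hi hj hpos
      have hnn' := fmin_nonneg hne i' j'
      have hm' : 0 ≤ natGet R i' j' := ih i' j' hi' hj' (by omega) (by omega)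
      have hin := hfr i j hi hj (by omega) i' j' hi' hj' hadj hm'
      have hge := hmin _ hin
      simp only at hge
      omega

theorem all_marked_of_nil {m n : Nat} {ws : List (Nat × Nat)} {R : List (List Int)}
    (hne : ws ≠ []) (hgrid : ∀ w ∈ ws, w.1 < m ∧ w.2 < n)
    (hinv : BfsInv m n ws [] R) :
    ∀ i j : Nat, i < m → j < n → 0 ≤ natGet R i j := by
  intro i j hi hj
  exact below_marked hne hgrid hinv (fmin ws i j + 1) (by simp)
    ((fmin ws i j).toNat) i j hi hj (by omega) (le_refl _)

-- the grid both programs compute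
def target (m n : Nat) (ws : List (Nat × Nat)) : List (List Int) :=
  (List.range m).map (fun i => (List.range n).map (fun j => fmin ws i j))

theorem natGet_eq_getElem {m n : Nat} {R : List (List Int)} (hsh : Shape m n R)
    {i j : Nat} (h1 : i < R.length) (h2 : j < (R[i]'h1).length) :
    natGet R i j = (R[i]'h1)[j]'h2 := by
  unfold natGet
  rw [List.getD_eq_getElem _ _ h1, List.getD_eq_getElem _ _ h2]

theorem eq_target_of_marked {m n : Nat} {ws : List (Nat × Nat)} {R : List (List Int)}
    (hsh : Shape m n R)
    (hmk : ∀ i j : Nat, i < m → j < n → 0 ≤ natGet R i j → natGet R i j = fmin ws i j)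
    (hall : ∀ i j : Nat, i < m → j < n → 0 ≤ natGet R i j) :
    R = target m n ws := by
  obtain ⟨hlen, hrow⟩ := hsh
  apply List.ext_getElem
  · simp [target, hlen]
  · intro i h1 h2
    have him : i < m := by rwa [hlen] at h1
    have hrl : (R[i]'h1).length = n := hrow _ (List.getElem_mem _)
    apply List.ext_getElem
    · simp [target, hrl]
    · intro j h3 h4
      have hjn : j < n := by rwa [hrl] at h3
      have hg : natGet R i j = (R[i]'h1)[j]'h3 := natGet_eq_getElem ⟨hlen, hrow⟩ h1 h3
      simp only [target, List.getElem_map, List.getElem_range]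
      rw [← hg]
      exact hmk i j him hjn (hall i j him hjn)

theorem terminal_eq {m n : Nat} {ws : List (Nat × Nat)} {R : List (List Int)}
    (hne : ws ≠ []) (hgrid : ∀ w ∈ ws, w.1 < m ∧ w.2 < n)
    (hinv : BfsInv m n ws [] R) : R = target m n ws := by
  have hall := all_marked_of_nil hne hgrid hinv
  exact eq_target_of_marked hinv.1 hinv.2.1 hall

-- membership and nodup of nbrsN
theorem mem_nbrsN {m n : Nat} {R : List (List Int)} {i j : Nat} (hi : i < m) (hj : j < n)
    {c : Nat × Nat} :
    c ∈ nbrsN m n R i j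
      ↔ c.1 < m ∧ c.2 < n ∧ adjN i j c.1 c.2 ∧ natGet R c.1 c.2 < 0 := by
  obtain ⟨a, b⟩ := c
  simp only [nbrsN, List.mem_append]
  constructor
  · intro h
    rcases h with ((h | h) | h) | h <;>
    · rw [List.mem_ite_nil_right] at h
      obtain ⟨⟨hb, hu⟩, hm⟩ := h
      simp only [List.mem_singleton, Prod.mk.injEq] at hm
      obtain ⟨rfl, rfl⟩ := hm
      exact ⟨by omega, by omega, by unfold adjN; omega, hu⟩
  · rintro ⟨ha, hb, hadj, hu⟩
    unfold adjN at hadj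
    rcases hadj with ⟨rfl, rfl | hb1⟩ | ⟨rfl, rfl | ha1⟩
    · left; left; left
      rw [List.mem_ite_nil_right]
      exact ⟨⟨hb, hu⟩, by simp⟩
    · left; left; right
      rw [List.mem_ite_nil_right]
      have hb2 : b = j - 1 := by omega
      subst hb2
      exact ⟨⟨by omega, hu⟩, by simp⟩
    · left; right
      rw [List.mem_ite_nil_right]
      exact ⟨⟨ha, hu⟩, by simp⟩
    · right
      rw [List.mem_ite_nil_right]
      have ha2 : a = i - 1 := by omega
      subst ha2
      exact ⟨⟨by omega, hu⟩, by simp⟩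

theorem ite_singleton_nodup (P : Prop) [Decidable P] (x : Nat × Nat) :
    (if P then [x] else []).Nodup := by
  split <;> simp

theorem nodup_nbrsN {m n : Nat} {R : List (List Int)} {i j : Nat} :
    (nbrsN m n R i j).Nodup := by
  unfold nbrsN
  simp only [List.nodup_append]
  repeat' apply And.intro
  all_goals
    first
    | apply ite_singleton_nodup
    | (intro a ha b hb
       simp only [List.mem_append, List.mem_ite_nil_right, List.mem_singleton] at ha hb
       obtain ⟨a1, a2⟩ := a
       obtain ⟨b1, b2⟩ := b
       simp only [Prod.mk.injEq, ne_eq, not_and] at ha hb ⊢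
       omega)

-- every unvisited neighbour of the popped minimal cell sits at distance d+1
theorem fmin_nbrs {m n : Nat} {ws : List (Nat × Nat)} {rest : List (Int × Int × Int)}
    {R : List (List Int)} {i j : Nat}
    (hne : ws ≠ []) (hgrid : ∀ w ∈ ws, w.1 < m ∧ w.2 < n)
    (hinv : BfsInv m n ws ((fmin ws i j, (i : Int), (j : Int)) :: rest) R)
    (hi : i < m) (hj : j < n) :
    ∀ c ∈ nbrsN m n R i j, fmin ws c.1 c.2 = fmin ws i j + 1 := by
  intro c hc
  rcases (mem_nbrsN hi hj).1 hc with ⟨hc1, hc2, hadj, hum⟩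
  have hup : fmin ws c.1 c.2 ≤ fmin ws i j + 1 := fmin_lip hne (adjN_symm hadj)
  have hmin := head_min hinv.2.2.2.1
  have hnnc := fmin_nonneg hne c.1 c.2
  have hnn := fmin_nonneg hne i j
  by_contra hne2
  have hle : fmin ws c.1 c.2 ≤ fmin ws i j := by omega
  by_cases hlt : fmin ws c.1 c.2 < fmin ws i j
  · have := below_marked hne hgrid hinv (fmin ws i j)
      (fun e he => hmin e he) ((fmin ws c.1 c.2).toNat) c.1 c.2 hc1 hc2 hlt (le_refl _)
    omega
  · have heq : fmin ws c.1 c.2 = fmin ws i j := by omega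
    by_cases hz : fmin ws i j = 0
    · have : (c.1, c.2) ∈ ws := fmin_zero_mem hne (by omega)
      have := hinv.2.2.1 _ this
      simp only at this
      omega
    · have hpos : 0 < fmin ws c.1 c.2 := by omega
      obtain ⟨p1, p2, hp1, hp2, hpadj, hpf⟩ := fmin_parent hne hgrid hc1 hc2 hpos
      have hpm : 0 ≤ natGet R p1 p2 := by
        exact below_marked hne hgrid hinv (fmin ws i j) (fun e he => hmin e he)
          ((fmin ws p1 p2).toNat) p1 p2 hp1 hp2 (by omega) (le_refl _)
      have hin := hinv.2.2.2.2.2 c.1 c.2 hc1 hc2 hum p1 p2 hp1 hp2 hpadj hpm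
      have := hmin _ hin
      simp only at this
      omega

-- ---------- one loop iteration ----------
theorem inv_step {m n : Nat} {ws : List (Nat × Nat)} {rest : List (Int × Int × Int)}
    {R : List (List Int)} {i j : Nat}
    (hne : ws ≠ []) (hgrid : ∀ w ∈ ws, w.1 < m ∧ w.2 < n)
    (hinv : BfsInv m n ws ((fmin ws i j, (i : Int), (j : Int)) :: rest) R)
    (hi : i < m) (hj : j < n) :
    BfsInv m n ws
      ((nbrsN m n R i j).foldl (fun pq c => pqInsert (fmin ws i j + 1, (c.1 : Int), (c.2 : Int)) pq) rest)
      (setMany (nbrsN m n R i j) (fmin ws i j + 1) R) := by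
  have hfnb : ∀ c ∈ nbrsN m n R i j, fmin ws c.1 c.2 = fmin ws i j + 1 :=
    fmin_nbrs hne hgrid hinv hi hj
  obtain ⟨hsh, hmk, hwm, hsort, hent, hfr⟩ := hinv
  have hmemL : ∀ c ∈ nbrsN m n R i j, c.1 < m ∧ c.2 < n ∧ adjN i j c.1 c.2 ∧ natGet R c.1 c.2 < 0 :=
    fun c hc => (mem_nbrsN hi hj).1 hc
  have hdnn : 0 ≤ fmin ws i j := fmin_nonneg hne i j
  have hLg : ∀ c ∈ nbrsN m n R i j, c.1 < m ∧ c.2 < n :=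
    fun c hc => ⟨(hmemL c hc).1, (hmemL c hc).2.1⟩
  have hsh' : Shape m n (setMany (nbrsN m n R i j) (fmin ws i j + 1) R) := shape_setMany hLg hsh
  have hget' : ∀ i' j' : Nat, natGet (setMany (nbrsN m n R i j) (fmin ws i j + 1) R) i' j'
      = if (i', j') ∈ nbrsN m n R i j then fmin ws i j + 1 else natGet R i' j' :=
    natGet_setMany hLg hsh
  have hmempq' : ∀ e, (e ∈ (nbrsN m n R i j).foldl
        (fun pq c => pqInsert (fmin ws i j + 1, (c.1 : Int), (c.2 : Int)) pq) rest) ↔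
      (e ∈ rest ∨ ∃ c ∈ nbrsN m n R i j, e = (fmin ws i j + 1, (c.1 : Int), (c.2 : Int))) :=
    fun e => mem_foldl_pqInsert (nbrsN m n R i j) _ rest e
  have hrest_pw : rest.Pairwise (fun x y => pqLt y x = false) := (List.pairwise_cons.1 hsort).2
  refine ⟨hsh', ?_, ?_, ?_, ?_, ?_⟩
  · intro i' j' hi' hj' hm'
    rw [hget'] at hm' ⊢
    by_cases hmem : (i', j') ∈ nbrsN m n R i j
    · simp only [hmem, if_true]
      exact (hfnb _ hmem).symm
    · simp only [hmem, if_false] at hm' ⊢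
      exact hmk i' j' hi' hj' hm'
  · intro w hw
    rw [hget']
    split
    · omega
    · exact hwm w hw
  · exact pairwise_foldl_pqInsert (nbrsN m n R i j) _ hrest_pw
  · intro e he
    rcases (hmempq' e).1 he with he' | ⟨c, hc, rfl⟩
    · obtain ⟨i', j', hi', hj', heq, hm'⟩ := hent e (List.mem_cons_of_mem _ he')
      refine ⟨i', j', hi', hj', heq, ?_⟩
      rw [hget']
      split
      · omega
      · exact hm'
    · refine ⟨c.1, c.2, (hLg c hc).1, (hLg c hc).2, ?_, ?_⟩
      · rw [hfnb c hc]
      · rw [hget']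
        have : (c.1, c.2) ∈ nbrsN m n R i j := by rwa [Prod.mk.eta]
        rw [if_pos this]
        omega
  · intro x1 x2 hx1 hx2 hxm y1 y2 hy1 hy2 hadj hym
    rw [hget'] at hxm hym
    have hxnot : (x1, x2) ∉ nbrsN m n R i j := by
      intro hmem
      rw [if_pos hmem] at hxm
      omega
    rw [if_neg hxnot] at hxm
    by_cases hymem : (y1, y2) ∈ nbrsN m n R i j
    · rw [hmempq']
      right
      refine ⟨(y1, y2), hymem, ?_⟩
      have hf := hfnb _ hymem
      simp only at hf
      rw [hf]
    · rw [if_neg hymem] at hym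
      have hold := hfr x1 x2 hx1 hx2 hxm y1 y2 hy1 hy2 hadj hym
      rcases List.mem_cons.1 hold with heq | hrest
      · have h2 : (y1 : Int) = (i : Int) := congrArg (fun e => e.2.1) heq
        have h3 : (y2 : Int) = (j : Int) := congrArg (fun e => e.2.2) heq
        have hy1i : y1 = i := by exact_mod_cast h2
        have hy2j : y2 = j := by exact_mod_cast h3
        subst hy1i; subst hy2j
        exact absurd ((mem_nbrsN hi hj).2 ⟨hx1, hx2, adjN_symm hadj, hxm⟩) hxnot
      · rw [hmempq']
        exact Or.inl hrest

theorem meas_step {m n : Nat} {ws : List (Nat × Nat)} {R : List (List Int)} {i j : Nat}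
    (hne : ws ≠ []) (hsh : Shape m n R) (hi : i < m) (hj : j < n) :
    umCount m n (setMany (nbrsN m n R i j) (fmin ws i j + 1) R) + (nbrsN m n R i j).length
      = umCount m n R := by
  have hmemL : ∀ c ∈ nbrsN m n R i j, c.1 < m ∧ c.2 < n ∧ adjN i j c.1 c.2 ∧ natGet R c.1 c.2 < 0 :=
    fun c hc => (mem_nbrsN hi hj).1 hc
  have hdnn : 0 ≤ fmin ws i j := fmin_nonneg hne i j
  exact umCount_setMany nodup_nbrsN (fun c hc => ⟨(hmemL c hc).1, (hmemL c hc).2.1⟩)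
    (fun c hc => (hmemL c hc).2.2.2) (by omega) hsh

-- ---------- the loop computes the target grid ----------
theorem loop_correct {m n : Nat} {ws : List (Nat × Nat)}
    (hne : ws ≠ []) (hgrid : ∀ w ∈ ws, w.1 < m ∧ w.2 < n) :
    ∀ fuel : Nat, ∀ pq R, BfsInv m n ws pq R → pq.length + 2 * umCount m n R ≤ fuel →
      loopA m n fuel pq R = target m n ws := by
  intro fuel
  induction fuel with
  | zero =>
    intro pq R hinv hle
    have hpq : pq = [] := by
      cases pq with
      | nil => rfl
      | cons e rest => simp at hle
    subst hpq
    exact terminal_eq hne hgrid hinv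
  | succ fuel ih =>
    intro pq R hinv hle
    match pq with
    | [] => exact terminal_eq hne hgrid hinv
    | (d, ei, ej) :: rest =>
      obtain ⟨i, j, hi, hj, heq, hm⟩ := hinv.2.2.2.2.1 _ (List.mem_cons_self ..)
      cases heq
      show loopA m n (fuel + 1) ((fmin ws i j, (i : Int), (j : Int)) :: rest) R = target m n ws
      rw [loopA]
      rw [unvisitedNeighbors_eq m n R i j hi hj]
      rw [List.foldl_map]
      dsimp only
      rw [foldl_pair_split (nbrsN m n R i j)
        (fun pq c => pqInsert (fmin ws i j + 1, (c.1 : Int), (c.2 : Int)) pq)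
        (fun Rr c => setCell Rr (c.1 : Int) (c.2 : Int) (fmin ws i j + 1)) rest R]
      dsimp only
      have hinv' := inv_step hne hgrid hinv hi hj
      have hmeas := meas_step hne hinv.1 hi hj (ws := ws)
      have hlen := length_foldl_pqInsert (nbrsN m n R i j)
        (fun c => (fmin ws i j + 1, (c.1 : Int), (c.2 : Int))) rest
      have hum_le : (nbrsN m n R i j).length
          ≤ umCount m n R := by omega
      apply ih _ _ hinv'
      simp only [List.length_cons] at hle
      omega

-- ---------- initialisation ----------
theorem foldl_congr' {α β : Type} {l : List α} {f g : β → α → β}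
    (h : ∀ acc x, f acc x = g acc x) : ∀ init, l.foldl f init = l.foldl g init := by
  induction l with
  | nil => intro init; rfl
  | cons x xs ih => intro init; simp only [List.foldl_cons, h, ih]

theorem mem_watersOf {g : List (List Int)} {c : Nat × Nat} :
    c ∈ watersOf g
      ↔ c.1 < g.length ∧ c.2 < (g.headD []).length ∧ (g.getD c.1 []).getD c.2 0 = 1 := by
  obtain ⟨a, b⟩ := c
  simp only [watersOf, List.mem_flatMap, List.mem_range, List.mem_filterMap,
    Option.ite_none_right_eq_some, Option.some.injEq, Prod.mk.injEq]
  constructor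
  · rintro ⟨i, hi, j, ⟨hj, hcond, rfl, rfl⟩⟩
    exact ⟨hi, hj, hcond⟩
  · rintro ⟨ha, hb, hcond⟩
    exact ⟨a, ha, b, ⟨hb, hcond, rfl, rfl⟩⟩

theorem length_watersOf_le (g : List (List Int)) :
    (watersOf g).length ≤ g.length * (g.headD []).length := by
  unfold watersOf
  rw [List.length_flatMap]
  calc ((List.range g.length).map fun i =>
          ((List.range (g.headD []).length).filterMap fun j =>
            if (g.getD i []).getD j 0 = 1 then some (i, j) else none).length).sum
      ≤ ((List.range g.length).map fun _ => (g.headD []).length).sum := by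
        apply List.sum_le_sum
        intro x hx
        exact le_trans (List.length_filterMap_le _ _) (by simp)
    _ = g.length * (g.headD []).length := by
        simp [List.map_const', List.sum_replicate, smul_eq_mul]

theorem shape_grid0 (m n : Nat) :
    Shape m n ((List.range m).map (fun _ => (List.range n).map (fun _ => (-1 : Int)))) := by
  constructor
  · simp
  · intro row hrow
    rcases List.mem_map.1 hrow with ⟨_, _, rfl⟩
    simp

theorem natGet_grid0 {m n i j : Nat} (hi : i < m) (hj : j < n) :
    natGet ((List.range m).map (fun _ => (List.range n).map (fun _ => (-1 : Int)))) i j = -1 := by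
  unfold natGet
  have h1 : i < ((List.range m).map (fun _ => (List.range n).map (fun _ => (-1 : Int)))).length := by
    simpa using hi
  rw [List.getD_eq_getElem _ _ h1, List.getElem_map]
  have h2 : j < ((List.range n).map (fun _ => (-1 : Int))).length := by simpa using hj
  rw [List.getD_eq_getElem _ _ h2, List.getElem_map]

-- ---------- initialisation characterised ----------
theorem init_eq (g : List (List Int)) (R0 : List (List Int)) :
    ((List.range g.length).foldl (fun s i =>
        (List.range (g.headD []).length).foldl (fun s j =>
          if (g.getD i []).getD j 0 = 1 then
            (pqInsert (0, (i : Int), (j : Int)) s.1, setCell s.2 (i : Int) (j : Int) 0)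
          else s) s)
      (([] : List (Int × Int × Int)), R0))
    = ((watersOf g).foldl (fun pq w => pqInsert (0, (w.1 : Int), (w.2 : Int)) pq) [],
       setMany (watersOf g) 0 R0) := by
  have h : ∀ s0 : List (Int × Int × Int) × List (List Int),
      (watersOf g).foldl (fun s (w : Nat × Nat) =>
        (pqInsert (0, (w.1 : Int), (w.2 : Int)) s.1, setCell s.2 (w.1 : Int) (w.2 : Int) 0)) s0
      = (List.range g.length).foldl (fun s i =>
          (List.range (g.headD []).length).foldl (fun s j =>
            if (g.getD i []).getD j 0 = 1 then
              (pqInsert (0, (i : Int), (j : Int)) s.1, setCell s.2 (i : Int) (j : Int) 0)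
            else s) s) s0 := by
    intro s0
    unfold watersOf
    rw [foldl_flatMap']
    exact foldl_congr' (fun acc i => foldl_filterMap_if (List.range (g.headD []).length)
      (fun j => (g.getD i []).getD j 0 = 1) (fun j => ((i : Nat), j))
      (fun s (w : Nat × Nat) =>
        (pqInsert (0, (w.1 : Int), (w.2 : Int)) s.1, setCell s.2 (w.1 : Int) (w.2 : Int) 0)) acc) s0
  rw [← h (([] : List (Int × Int × Int)), R0),
    foldl_pair_split (watersOf g)
      (fun pq (w : Nat × Nat) => pqInsert (0, (w.1 : Int), (w.2 : Int)) pq)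
      (fun Rr (w : Nat × Nat) => setCell Rr (w.1 : Int) (w.2 : Int) 0) [] R0]
  rfl

-- ---------- the invariant holds after initialisation ----------
theorem inv_init {g : List (List Int)} (hne : watersOf g ≠ []) :
    BfsInv g.length (g.headD []).length (watersOf g)
      ((watersOf g).foldl (fun pq w => pqInsert (0, (w.1 : Int), (w.2 : Int)) pq) [])
      (setMany (watersOf g) 0
        ((List.range g.length).map (fun _ => (List.range (g.headD []).length).map (fun _ => (-1 : Int))))) := by
  have hgrid : ∀ w ∈ watersOf g, w.1 < g.length ∧ w.2 < (g.headD []).length :=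
    fun w hw => ⟨(mem_watersOf.1 hw).1, (mem_watersOf.1 hw).2.1⟩
  have hsh0 := shape_grid0 g.length (g.headD []).length
  have hget := natGet_setMany (v := 0) hgrid hsh0
  have hmem := mem_foldl_pqInsert (watersOf g)
    (fun w => ((0 : Int), (w.1 : Int), (w.2 : Int))) []
  refine ⟨shape_setMany hgrid hsh0, ?_, ?_, ?_, ?_, ?_⟩
  · intro i j hi hj hmk
    rw [hget] at hmk ⊢
    by_cases hc : (i, j) ∈ watersOf g
    · rw [if_pos hc]
      exact (fmin_water hc).symm
    · rw [if_neg hc, natGet_grid0 hi hj] at hmk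
      omega
  · intro w hw
    rw [hget, if_pos (by rwa [Prod.mk.eta])]
  · exact pairwise_foldl_pqInsert _ _ List.Pairwise.nil
  · intro e he
    rcases (hmem e).1 he with he' | ⟨c, hc, rfl⟩
    · cases he'
    · refine ⟨c.1, c.2, (hgrid c hc).1, (hgrid c hc).2, ?_, ?_⟩
      · rw [fmin_water (by rwa [Prod.mk.eta])]
      · rw [hget, if_pos (by rwa [Prod.mk.eta])]
  · intro x1 x2 hx1 hx2 hxm y1 y2 hy1 hy2 hadj hym
    rw [hget] at hym
    by_cases hc : (y1, y2) ∈ watersOf g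
    · rw [hmem]
      right
      exact ⟨(y1, y2), hc, by rw [fmin_water hc]⟩
    · rw [if_neg hc, natGet_grid0 hy1 hy2] at hym
      omega

-- ---------- B computes the target grid ----------
theorem alt_eq_target (g : List (List Int)) :
    highest_peak_heap_alt g = target g.length (g.headD []).length (watersOf g) := by
  unfold highest_peak_heap_alt target
  cases h : watersOf g with
  | nil => simp [fmin]
  | cons w t => simp [fmin]

-- ---------- A computes the target grid too ----------
theorem highest_peak_heap_eq_alt (g : List (List Int)) :
    highest_peak_heap g = highest_peak_heap_alt g := by
  unfold highest_peak_heap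
  simp only []
  rw [init_eq g]
  dsimp only
  rw [alt_eq_target g]
  by_cases hws : watersOf g = []
  · rw [hws]
    simp only [List.foldl_nil]
    show loopA g.length (g.headD []).length _ []
      (setMany [] 0 ((List.range g.length).map (fun _ => (List.range (g.headD []).length).map (fun _ => (-1 : Int)))))
      = _
    have hA : ∀ R : List (List Int),
        loopA g.length (g.headD []).length (3 * g.length * (g.headD []).length + 1) [] R = R := by
      intro R
      rw [loopA]
    rw [hA]
    unfold target setMany
    simp [fmin]
  · have hgrid : ∀ w ∈ watersOf g, w.1 < g.length ∧ w.2 < (g.headD []).length :=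
      fun w hw => ⟨(mem_watersOf.1 hw).1, (mem_watersOf.1 hw).2.1⟩
    apply loop_correct hws hgrid
    · exact inv_init hws
    · have h1 : ((watersOf g).foldl (fun pq w => pqInsert (0, (w.1 : Int), (w.2 : Int)) pq) []).length
          = (watersOf g).length := by
        rw [length_foldl_pqInsert]
        simp
      have h2 := length_watersOf_le g
      have h3 := umCount_le g.length (g.headD []).length
        (setMany (watersOf g) 0
          ((List.range g.length).map (fun _ => (List.range (g.headD []).length).map (fun _ => (-1 : Int)))))
      rw [h1]
      have h4 : 3 * g.length * (g.headD []).length = 3 * (g.length * (g.headD []).length) := by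
        ring
      rw [h4]
      omega

-- ===== VERDICT (by name: the statement is the Claim_ definition above) =====
theorem highest_peak_heap_spec : Claim_equal_highest_peak_heap := by
  intro is_water _ _
  unfold Spec_highest_peak_heap
  exact highest_peak_heap_eq_alt is_water
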